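-- pv_equiv track=rewrite | github.com/pokemaster345x/Codeforces-Solutions | codeforces/Training Camp Medellín 2024/Contest Avanzado [Día 1]/K - Blown Garland.py | mueltos
-- ===== SOURCE A (Python) =====
-- def mueltos(s):
--     n=len(s)
--     bombillasmuertas={'R': 0, 'B': 0, 'Y': 0, 'G': 0}
--     posiciones={'R': -10, 'B': -10, 'Y': -10, 'G': -10}
--     for i in range(n):
--         if s[i] in posiciones:
--             posiciones[s[i]]=i%4
--     for i in range(n):
--         if s[i]=='!':
--             pos=i%4
--             for color,p in posiciones.items():
--                 if p==pos:
--                     bombillasmuertas[color]+=1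
--     return bombillasmuertas['R'],bombillasmuertas['B'],bombillasmuertas['Y'],bombillasmuertas['G']
-- ===== SOURCE B (Python) =====
-- def mueltos(s):
--     def cuenta(color):
--         # scan backwards for the last occurrence of this color, then count '!'
--         # at the same position modulo 4; 0 if the color never occurs
--         for i, c in reversed(list(enumerate(s))):
--             if c == color:
--                 return sum(1 for j, cj in enumerate(s) if cj == '!' and j % 4 == i % 4)
--         return 0
--     return cuenta('R'), cuenta('B'), cuenta('Y'), cuenta('G')
-- ===== Notes on version B (the rewrite author's own statement) =====
-- stated objective: simpler
-- what changed: B drops both of A's dictionaries: for each of the four colors it searches the string backwards for the last occurrence (early exit) and then counts '!' characters at the same index modulo 4 with one direct comprehension, returning 0 for an absent color.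
import Mathlib
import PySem

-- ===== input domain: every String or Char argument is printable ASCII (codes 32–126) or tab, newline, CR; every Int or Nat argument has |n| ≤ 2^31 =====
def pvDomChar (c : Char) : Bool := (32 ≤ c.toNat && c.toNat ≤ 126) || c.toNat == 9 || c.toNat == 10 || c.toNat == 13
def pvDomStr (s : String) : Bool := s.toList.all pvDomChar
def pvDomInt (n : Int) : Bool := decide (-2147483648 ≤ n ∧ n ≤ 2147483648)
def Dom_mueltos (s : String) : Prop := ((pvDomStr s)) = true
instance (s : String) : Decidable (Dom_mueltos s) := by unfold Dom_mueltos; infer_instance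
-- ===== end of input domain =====

-- B drops A's two dictionaries: per color it scans backwards for the last occurrence and counts '!' at that residue mod 4 directly (simpler decomposition, same cost).

-- ===== PORT A =====
-- A's first pass: last-occurrence residue i % 4 per color, in a dict
def pvPosStep (d : PySem.Dict Char Int) (p : Int × Char) : PySem.Dict Char Int :=
  if d.contains p.2 then d.insert p.2 (PySem.Int.mod p.1 4) else d

def pvPosiciones (ps : List (Int × Char)) : PySem.Dict Char Int :=
  ps.foldl pvPosStep (PySem.Dict.ofList [('R', -10), ('B', -10), ('Y', -10), ('G', -10)])

-- A's inner loop over posiciones.items()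
def pvInnerA (r : Int) (its : List (Char × Int)) (bm : PySem.Dict Char Int) : PySem.Dict Char Int :=
  its.foldl (fun bm cp => if cp.2 = r then bm.modify cp.1 0 (· + 1) else bm) bm

def mueltos (s : String) : Int × Int × Int × Int :=
  let ps := PySem.List.enumerate s.toList
  let posiciones := pvPosiciones ps
  let bm := ps.foldl (fun bm p =>
      if p.2 = '!' then pvInnerA (PySem.Int.mod p.1 4) posiciones.items bm else bm)
    (PySem.Dict.ofList [('R', 0), ('B', 0), ('Y', 0), ('G', 0)])
  (bm.getD 'R' 0, bm.getD 'B' 0, bm.getD 'Y' 0, bm.getD 'G' 0)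

-- ===== PORT B =====
-- B's 'cuenta': walk reversed(list(enumerate(s))) until the color is found,
-- then one comprehension counting '!' at the same residue; 0 if never found
def pvCuentaLoop (cs : List Char) (color : Char) : List (Int × Char) → Int
  | [] => 0
  | p :: rest =>
      if p.2 = color then
        (PySem.List.enumerate cs).foldl
          (fun acc q => if q.2 = '!' ∧ PySem.Int.mod q.1 4 = PySem.Int.mod p.1 4 then acc + 1 else acc) 0
      else pvCuentaLoop cs color rest

def mueltos_alt (s : String) : Int × Int × Int × Int :=
  (pvCuentaLoop s.toList 'R' ((PySem.List.enumerate s.toList).reverse),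
   pvCuentaLoop s.toList 'B' ((PySem.List.enumerate s.toList).reverse),
   pvCuentaLoop s.toList 'Y' ((PySem.List.enumerate s.toList).reverse),
   pvCuentaLoop s.toList 'G' ((PySem.List.enumerate s.toList).reverse))

-- ===== PRECONDITION & SPEC =====
def Spec_mueltos (s : String) (out : Int × Int × Int × Int) : Prop := out = mueltos_alt s
instance (s : String) (out : Int × Int × Int × Int) : Decidable (Spec_mueltos s out) := by unfold Spec_mueltos; infer_instance

-- ===== CLAIM (what is proved, stated in full; the proofs are below) =====
def Claim_equal_mueltos : Prop := ∀ (s : String), Dom_mueltos s → Spec_mueltos s (mueltos s)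

-- ===== LEMMAS AND PROOFS =====

-- A's outer '!' step, named so proofs can unfold it
def pvStepA (pos : PySem.Dict Char Int) (bm : PySem.Dict Char Int) (p : Int × Char) : PySem.Dict Char Int :=
  if p.2 = '!' then pvInnerA (PySem.Int.mod p.1 4) pos.items bm else bm

lemma pvInnerA_cons (r : Int) (cp : Char × Int) (t : List (Char × Int)) (bm : PySem.Dict Char Int) :
    pvInnerA r (cp :: t) bm = pvInnerA r t (if cp.2 = r then bm.modify cp.1 0 (· + 1) else bm) := rfl

-- the first pass never changes the key list
lemma keys_foldl_posStep (ps : List (Int × Char)) (d : PySem.Dict Char Int) :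
    (ps.foldl pvPosStep d).keys = d.keys := by
  induction ps generalizing d with
  | nil => rfl
  | cons p t ih =>
    simp only [List.foldl_cons]
    rw [ih]
    unfold pvPosStep
    by_cases h : d.contains p.2
    · simp only [h, if_true]
      exact PySem.Dict.keys_insert_of_contains d _ h
    · simp [h]

lemma contains_foldl_posStep (ps : List (Int × Char)) (d : PySem.Dict Char Int) (c : Char) :
    (ps.foldl pvPosStep d).contains c = d.contains c := by
  rw [PySem.Dict.contains_eq_decide_mem_keys, PySem.Dict.contains_eq_decide_mem_keys,
    keys_foldl_posStep]

-- the first pass records the residue of the LAST occurrence of a tracked color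
lemma posFold_getD (ps : List (Int × Char)) (d : PySem.Dict Char Int) (c : Char)
    (hc : d.contains c = true) :
    (ps.foldl pvPosStep d).getD c 0 =
      match ps.reverse.find? (fun p => p.2 == c) with
      | some p => PySem.Int.mod p.1 4
      | none => d.getD c 0 := by
  induction ps using List.reverseRecOn with
  | nil => simp
  | append_singleton t p ih =>
    rw [List.foldl_append, List.foldl_cons, List.foldl_nil, List.reverse_append]
    simp only [List.reverse_cons, List.reverse_nil, List.nil_append, List.singleton_append,
      List.find?_cons]
    have hstep : pvPosStep (t.foldl pvPosStep d) p =
        if (t.foldl pvPosStep d).contains p.2 then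
          (t.foldl pvPosStep d).insert p.2 (PySem.Int.mod p.1 4)
        else t.foldl pvPosStep d := rfl
    by_cases h : p.2 = c
    · have hcon : (t.foldl pvPosStep d).contains p.2 = true := by
        rw [contains_foldl_posStep, h]; exact hc
      rw [hstep, if_pos hcon, h]
      simp [PySem.Dict.getD_insert_self]
    · have hne : (p.2 == c) = false := by simp [h]
      rw [hne, hstep]
      by_cases h2 : (t.foldl pvPosStep d).contains p.2
      · rw [if_pos h2, PySem.Dict.getD_insert, if_neg (Ne.symm h)]
        exact ih
      · rw [if_neg h2]
        exact ih

-- A's inner loop leaves a color alone when it does not occur among the keys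
lemma innerA_getD_not_mem (r : Int) (its : List (Char × Int)) (bm : PySem.Dict Char Int)
    (c : Char) (hc : c ∉ its.map Prod.fst) :
    (pvInnerA r its bm).getD c 0 = bm.getD c 0 := by
  induction its generalizing bm with
  | nil => rfl
  | cons cp t ih =>
    simp only [List.map_cons, List.mem_cons, not_or] at hc
    rw [pvInnerA_cons, ih _ hc.2]
    by_cases h : cp.2 = r
    · rw [if_pos h, PySem.Dict.getD_modify_of_ne _ _ _ hc.1]
    · rw [if_neg h]

-- A's inner loop bumps color c by 1 exactly when its recorded residue equals r
lemma innerA_getD_mem (r : Int) (its : List (Char × Int)) (bm : PySem.Dict Char Int)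
    (c : Char) (pc : Int) (hnd : (its.map Prod.fst).Nodup) (hc : (c, pc) ∈ its) :
    (pvInnerA r its bm).getD c 0 = bm.getD c 0 + (if pc = r then 1 else 0) := by
  induction its generalizing bm with
  | nil => cases hc
  | cons cp t ih =>
    simp only [List.map_cons, List.nodup_cons] at hnd
    rw [pvInnerA_cons]
    rcases List.mem_cons.mp hc with h1 | h1
    · have hcn : c ∉ t.map Prod.fst := by rw [← h1] at hnd; exact hnd.1
      rw [innerA_getD_not_mem _ _ _ _ hcn]
      by_cases h : cp.2 = r
      · rw [if_pos h]
        have hk : cp.1 = c := by rw [← h1]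
        have hv : pc = r := by rw [← h1] at h; exact h
        rw [hk, PySem.Dict.getD_modify_self, if_pos hv]
      · rw [if_neg h]
        have hv : ¬ pc = r := by rw [← h1] at h; exact h
        rw [if_neg hv, add_zero]
    · have hne : cp.1 ≠ c := by
        intro he; exact hnd.1 (he ▸ (List.mem_map.mpr ⟨(c, pc), h1, rfl⟩))
      by_cases h : cp.2 = r
      · rw [if_pos h, ih _ hnd.2 h1, PySem.Dict.getD_modify_of_ne _ _ _ (Ne.symm hne)]
      · rw [if_neg h, ih _ hnd.2 h1]

-- the count both programs compute, per recorded residue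
def pvQ (pc : Int) (p : Int × Char) : Bool := p.2 == '!' && pc == PySem.Int.mod p.1 4

-- A's outer loop: each color accumulates the count of '!' positions at its residue
lemma foldA_getD (pos : PySem.Dict Char Int) (c : Char) (pc : Int)
    (hnd : (pos.items.map Prod.fst).Nodup) (hc : (c, pc) ∈ pos.items)
    (ps : List (Int × Char)) (bm : PySem.Dict Char Int) :
    (ps.foldl (pvStepA pos) bm).getD c 0 = bm.getD c 0 + (ps.countP (pvQ pc) : Int) := by
  induction ps generalizing bm with
  | nil => simp
  | cons p t ih =>
    simp only [List.foldl_cons, List.countP_cons]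
    by_cases h : p.2 = '!'
    · rw [show pvStepA pos bm p = pvInnerA (PySem.Int.mod p.1 4) pos.items bm from by
        unfold pvStepA; rw [if_pos h]]
      rw [ih _, innerA_getD_mem _ _ _ _ _ hnd hc]
      have hmod : PySem.Int.mod p.1 4 = p.1 % 4 := PySem.Int.mod_eq_emod_of_pos (by norm_num)
      by_cases h2 : pc = PySem.Int.mod p.1 4
      · have hq : pvQ pc p = true := by simp [pvQ, h]; rw [← hmod]; exact h2
        rw [if_pos h2, hq]; simp; ring
      · have hq : pvQ pc p = false := by simp [pvQ, h]; rw [← hmod]; exact h2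
        rw [if_neg h2, hq]; simp
    · rw [show pvStepA pos bm p = bm from by unfold pvStepA; rw [if_neg h]]
      have hq : pvQ pc p = false := by simp [pvQ, h]
      rw [ih _, hq]; simp

-- B's loop IS a find?-then-count
lemma cuentaLoop_eq (cs : List Char) (color : Char) (l : List (Int × Char)) :
    pvCuentaLoop cs color l =
      match l.find? (fun p => p.2 == color) with
      | some p => ((PySem.List.enumerate cs).countP
          (fun q => decide (q.2 = '!' ∧ PySem.Int.mod q.1 4 = PySem.Int.mod p.1 4)) : Int)
      | none => 0 := by
  induction l with
  | nil => rfl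
  | cons p rest ih =>
    rw [List.find?_cons]
    by_cases h : p.2 = color
    · simp only [pvCuentaLoop, h, BEq.rfl]
      rw [PySem.List.foldl_ite_add_one]
      simp
    · have hne : (p.2 == color) = false := by simp [h]
      rw [hne]
      simpa [pvCuentaLoop, if_neg h] using ih

-- one color's worth of the final equality
set_option maxRecDepth 4096 in
lemma component_eq (cs : List Char) (c : Char) (hc : c ∈ ['R', 'B', 'Y', 'G']) :
    ((PySem.List.enumerate cs).foldl (pvStepA (pvPosiciones (PySem.List.enumerate cs)))
        (PySem.Dict.ofList [('R', 0), ('B', 0), ('Y', 0), ('G', 0)])).getD c 0 =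
      pvCuentaLoop cs c ((PySem.List.enumerate cs).reverse) := by
  set ps := PySem.List.enumerate cs with hps
  have hkeys : (pvPosiciones ps).keys = ['R', 'B', 'Y', 'G'] := by
    unfold pvPosiciones; rw [keys_foldl_posStep]; decide
  have hnd : ((pvPosiciones ps).items.map Prod.fst).Nodup := by
    have : (pvPosiciones ps).keys.Nodup := by rw [hkeys]; decide
    simpa [PySem.Dict.keys] using this
  have hcontains : (pvPosiciones ps).contains c = true := by
    rw [PySem.Dict.contains_iff_mem_keys, hkeys]; exact hc
  have hsome : ((pvPosiciones ps).get? c).isSome = true := by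
    rw [← PySem.Dict.contains_eq_isSome_get?]; exact hcontains
  obtain ⟨pc, hpc⟩ := Option.isSome_iff_exists.mp hsome
  have hmem : (c, pc) ∈ (pvPosiciones ps).items :=
    PySem.Dict.mem_items_of_get?_eq_some _ hpc
  have hgd : (pvPosiciones ps).getD c 0 = pc := PySem.Dict.getD_of_get?_eq_some _ 0 hpc
  have hc0 : (PySem.Dict.ofList [('R', (-10:Int)), ('B', -10), ('Y', -10), ('G', -10)]).contains c = true := by
    fin_cases hc <;> decide
  have hpos := posFold_getD ps (PySem.Dict.ofList [('R', (-10:Int)), ('B', -10), ('Y', -10), ('G', -10)]) c hc0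
  rw [show (PySem.List.enumerate cs).foldl pvPosStep
        (PySem.Dict.ofList [('R', (-10:Int)), ('B', -10), ('Y', -10), ('G', -10)]) = pvPosiciones ps from rfl,
    hgd] at hpos
  have hbm0 : (PySem.Dict.ofList [('R', (0:Int)), ('B', 0), ('Y', 0), ('G', 0)]).getD c 0 = 0 := by
    fin_cases hc <;> decide
  rw [foldA_getD (pvPosiciones ps) c pc hnd hmem, hbm0, zero_add, cuentaLoop_eq]
  cases hf : ps.reverse.find? (fun p => p.2 == c) with
  | some p =>
    rw [hf] at hpos
    have hpc4 : pc = PySem.Int.mod p.1 4 := hpos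
    simp only
    refine congrArg _ (List.countP_congr ?_)
    intro q _
    have hmq : PySem.Int.mod q.1 4 = q.1 % 4 := PySem.Int.mod_eq_emod_of_pos (by norm_num)
    have hmp : PySem.Int.mod p.1 4 = p.1 % 4 := PySem.Int.mod_eq_emod_of_pos (by norm_num)
    have hpc4' : pc = p.1 % 4 := by rw [hpc4, hmp]
    by_cases h1 : q.2 = '!'
    · by_cases h2 : q.1 % 4 = p.1 % 4
      · simp [pvQ, h1, h2, hpc4']
      · have hb : ((p.1 % 4 : Int) == q.1 % 4) = false :=
          beq_eq_false_iff_ne.mpr (fun he => h2 he.symm)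
        simp [pvQ, h1, h2, hpc4', hb]
    · simp [pvQ, h1]
  | none =>
    rw [hf] at hpos
    have hpc10 : pc = -10 := by
      rw [hpos]; fin_cases hc <;> decide
    simp only
    rw [List.countP_eq_zero.mpr, Nat.cast_zero]
    intro q _
    have h4 : (0:Int) ≤ PySem.Int.mod q.1 4 := PySem.Int.mod_nonneg _ (by norm_num)
    have hm : PySem.Int.mod q.1 4 = q.1 % 4 := PySem.Int.mod_eq_emod_of_pos (by norm_num)
    rw [hm] at h4
    simp only [pvQ, hpc10, hm, Bool.and_eq_true, beq_iff_eq, not_and]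
    intro _
    omega

-- ===== VERDICT (by name: the statement is the Claim_ definition above) =====
theorem mueltos_spec : Claim_equal_mueltos := by
  intro s _
  unfold Spec_mueltos mueltos mueltos_alt
  refine Prod.ext ?_ (Prod.ext ?_ (Prod.ext ?_ ?_)) <;>
    exact component_eq _ _ (by decide)
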